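-- pv_equiv track=rewrite | github.com/a100459/ATP2022 | TPC6/aula6.py TPC6.py | inversaoestrutural
-- ===== SOURCE A (Python) =====
-- def inversaoestrutural(obras):
--     res= []
--     listaComp= []
--     for obra in obras:
--         nome, desc, ano, periodo, comp, duracao, id = obra
--         if comp not in listaComp:
--             listaComp.append(comp)
--     for compositor in listaComp:
--         listaObras= []
--         for obra in obras:
--             nome, desc, ano, periodo, comp, duracao, id = obra
--             if  comp == compositor:
--                 listaObras.append(nome)
--         res.append((compositor, listaObras))
--     return res
-- ===== SOURCE B (Python) =====
-- def inversaoestrutural(obras):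
--     grupos = {}
--     for obra in obras:
--         nome, desc, ano, periodo, comp, duracao, id = obra
--         grupos.setdefault(comp, []).append(nome)
--     return list(grupos.items())
-- ===== Notes on version B (the rewrite author's own statement) =====
-- stated objective: faster
-- what changed: Replaced A's collect-distinct-composers pass followed by one full rescan of obras per composer with a single pass that appends each work's name into an insertion-ordered dict keyed by composer.
import Mathlib
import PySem

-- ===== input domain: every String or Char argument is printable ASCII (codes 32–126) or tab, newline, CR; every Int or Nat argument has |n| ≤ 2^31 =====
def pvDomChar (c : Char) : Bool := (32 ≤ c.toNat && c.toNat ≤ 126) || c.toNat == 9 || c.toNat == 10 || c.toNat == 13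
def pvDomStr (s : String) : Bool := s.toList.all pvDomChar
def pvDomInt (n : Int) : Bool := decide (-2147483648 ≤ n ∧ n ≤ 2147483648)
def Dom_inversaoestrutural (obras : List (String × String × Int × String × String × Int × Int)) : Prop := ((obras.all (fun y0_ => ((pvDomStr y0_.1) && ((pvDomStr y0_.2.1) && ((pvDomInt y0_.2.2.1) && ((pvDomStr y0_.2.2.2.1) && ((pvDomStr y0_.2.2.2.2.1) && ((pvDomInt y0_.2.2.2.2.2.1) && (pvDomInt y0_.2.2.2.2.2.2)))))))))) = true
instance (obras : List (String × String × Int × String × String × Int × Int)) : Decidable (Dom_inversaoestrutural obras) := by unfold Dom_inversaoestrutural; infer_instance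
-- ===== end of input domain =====

-- B replaces A's distinct-composer pass plus one full rescan of obras per composer by a
-- single pass appending each name into an insertion-ordered dict keyed by composer.

-- ===== PORT A =====
def inversaoestrutural (obras : List (String × String × Int × String × String × Int × Int)) : List (String × List String) :=
  let listaComp := obras.foldl (fun lc obra =>
    if obra.2.2.2.2.1 ∈ lc then lc else lc ++ [obra.2.2.2.2.1]) []
  listaComp.foldl (fun res compositor =>
    res ++ [(compositor,
      obras.foldl (fun lo obra =>
        if obra.2.2.2.2.1 == compositor then lo ++ [obra.1] else lo) [])]) []

-- ===== PORT B =====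
def inversaoestrutural_alt (obras : List (String × String × Int × String × String × Int × Int)) : List (String × List String) :=
  (obras.foldl (fun g obra => g.modify obra.2.2.2.2.1 [] (· ++ [obra.1]))
    (PySem.Dict.empty : PySem.Dict String (List String))).items

-- ===== PRECONDITION & SPEC =====
def Spec_inversaoestrutural (obras : List (String × String × Int × String × String × Int × Int)) (out : List (String × List String)) : Prop := out = inversaoestrutural_alt obras
instance (obras : List (String × String × Int × String × String × Int × Int)) (out : List (String × List String)) : Decidable (Spec_inversaoestrutural obras out) := by unfold Spec_inversaoestrutural; infer_instance

-- ===== CLAIM (what is proved, stated in full; the proofs are below) =====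
def Claim_equal_inversaoestrutural : Prop := ∀ (obras : List (String × String × Int × String × String × Int × Int)), Dom_inversaoestrutural obras → Spec_inversaoestrutural obras (inversaoestrutural obras)

-- ===== LEMMAS AND PROOFS =====

-- A's first loop is ordered dedup of the composers.
theorem listaComp_eq (obras : List (String × String × Int × String × String × Int × Int)) :
    obras.foldl (fun lc obra =>
      if obra.2.2.2.2.1 ∈ lc then lc else lc ++ [obra.2.2.2.2.1]) []
    = PySem.Set.ofList (obras.map (fun o => o.2.2.2.2.1)) := by
  have hfun : (fun (lc : List String) (obra : String × String × Int × String × String × Int × Int) =>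
      if obra.2.2.2.2.1 ∈ lc then lc else lc ++ [obra.2.2.2.2.1])
      = (fun lc obra => PySem.Set.add lc obra.2.2.2.2.1) := by
    funext lc o
    rw [PySem.Set.add_eq_ite]
  rw [hfun, ← PySem.Set.update_map_eq_foldl_add, PySem.Set.update_nil_left]

-- A's inner loop collects the names of the works of composer c.
theorem inner_eq (obras : List (String × String × Int × String × String × Int × Int)) (c : String) :
    obras.foldl (fun lo obra =>
      if obra.2.2.2.2.1 == c then lo ++ [obra.1] else lo) []
    = (obras.filter (fun o => o.2.2.2.2.1 == c)).map (·.1) := by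
  rw [PySem.List.foldl_append_if, List.nil_append]

-- B's grouping dict: its keys and each stored group.
theorem alt_keys (obras : List (String × String × Int × String × String × Int × Int)) :
    (obras.foldl (fun g obra => g.modify obra.2.2.2.2.1 [] (· ++ [obra.1]))
      (PySem.Dict.empty : PySem.Dict String (List String))).keys
    = PySem.Set.ofList (obras.map (fun o => o.2.2.2.2.1)) := by
  rw [PySem.Dict.keys_foldl_modify_key]
  rfl

theorem alt_getD (obras : List (String × String × Int × String × String × Int × Int)) (c : String) :
    (obras.foldl (fun g obra => g.modify obra.2.2.2.2.1 [] (· ++ [obra.1]))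
      (PySem.Dict.empty : PySem.Dict String (List String))).getD c []
    = (obras.filter (fun o => o.2.2.2.2.1 == c)).map (·.1) := by
  rw [← List.foldl_map (f := fun (o : String × String × Int × String × String × Int × Int) => (o.2.2.2.2.1, o.1))
        (g := fun (g : PySem.Dict String (List String)) (p : String × String) => g.modify p.1 [] (· ++ [p.2]))]
  rw [PySem.Dict.getD_foldl_modify_append, PySem.Dict.getD_empty, List.nil_append]
  rw [List.filter_map, List.map_map]
  rfl

theorem inversaoestrutural_eq (obras : List (String × String × Int × String × String × Int × Int)) :
    inversaoestrutural obras = inversaoestrutural_alt obras := by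
  unfold inversaoestrutural inversaoestrutural_alt
  have hnd : (obras.foldl (fun g obra => g.modify obra.2.2.2.2.1 [] (· ++ [obra.1]))
      (PySem.Dict.empty : PySem.Dict String (List String))).keys.Nodup := by
    rw [alt_keys]
    exact PySem.Set.nodup_ofList _
  rw [PySem.Dict.items_eq_map_keys _ hnd [], alt_keys, listaComp_eq,
    PySem.List.foldl_append_singleton_eq_map, List.nil_append]
  apply List.map_congr_left
  intro c _
  rw [inner_eq, alt_getD]

-- ===== VERDICT (by name: the statement is the Claim_ definition above) =====
theorem inversaoestrutural_spec : Claim_equal_inversaoestrutural := by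
  intro obras _
  exact inversaoestrutural_eq obras
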